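-- pv_equiv track=rewrite | github.com/Pawansingh3889/forthepeople-uk | postcode.py | find_council
-- ===== SOURCE A (Python) =====
-- from typing import Any
--
-- def find_council(
--     postcode_result: dict[str, Any],
--     councils: dict[str, list[str]],
-- ) -> tuple[str, str] | None:
--     """Match a postcodes.io result to a (region, council) in our dataset.
--
--     postcodes.io returns admin names like "City of York", "London
--     Borough of Camden", or plain "Leeds"; our council list uses the
--     short form ("York", "Camden", "Leeds"). The match strategy is:
--
--     1. Check ``admin_district`` and ``parliamentary_constituency`` for
--        an exact case-insensitive match against any council name.
--     2. Fall back to substring match (handles the "City of ..." /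
--        "London Borough of ..." prefixes).
--     3. Return ``None`` if nothing matches, so the caller can surface a
--        useful message rather than guessing.
--     """
--     if not isinstance(postcode_result, dict):
--         return None
--
--     candidates = [
--         str(postcode_result.get("admin_district") or ""),
--         str(postcode_result.get("parliamentary_constituency") or ""),
--     ]
--     candidates = [c.lower() for c in candidates if c]
--     if not candidates:
--         return None
--
--     # Pass 1 — exact match.
--     for region, council_list in councils.items():
--         for council in council_list:
--             council_lower = council.lower()
--             if any(c == council_lower for c in candidates):
--                 return region, council
--
--     # Pass 2 — substring. Sort by council-name length descending so
--     # "Stoke-on-Trent" matches before "Stoke".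
--     all_councils = [
--         (region, council)
--         for region, council_list in councils.items()
--         for council in council_list
--     ]
--     all_councils.sort(key=lambda rc: -len(rc[1]))
--     for region, council in all_councils:
--         council_lower = council.lower()
--         if any(council_lower in c for c in candidates):
--             return region, council
--
--     return None
-- ===== SOURCE B (Python) =====
-- def find_council(postcode_result, councils):
--     if not isinstance(postcode_result, dict):
--         return None
--
--     candidates = []
--     for key in ("admin_district", "parliamentary_constituency"):
--         value = str(postcode_result.get(key) or "")
--         if value:
--             candidates.append(value.lower())
--     if not candidates:
--         return None
--
--     # One fused pass in dict iteration order: the first exact match returns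
--     # immediately (exact matches always beat substring matches); otherwise a
--     # running (best, best_len) tracker keeps the longest substring match,
--     # strict '>' keeping the first-encountered among equal lengths.
--     best = None
--     best_len = -1
--     for region, council_list in councils.items():
--         for council in council_list:
--             low = council.lower()
--             if low in candidates:
--                 return region, council
--             if len(council) > best_len and any(low in c for c in candidates):
--                 best = (region, council)
--                 best_len = len(council)
--     return best
-- ===== Notes on version B (the rewrite author's own statement) =====
-- stated objective: alternative
-- what changed: A's two staged passes (exact-match scan, then flatten all pairs and stable-sort by descending name length for the substring fallback) are fused into one single pass in dict order that returns immediately on an exact match and otherwise tracks the longest substring match with a strict '>' tie-break, eliminating the flatten and the sort.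
import Mathlib
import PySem

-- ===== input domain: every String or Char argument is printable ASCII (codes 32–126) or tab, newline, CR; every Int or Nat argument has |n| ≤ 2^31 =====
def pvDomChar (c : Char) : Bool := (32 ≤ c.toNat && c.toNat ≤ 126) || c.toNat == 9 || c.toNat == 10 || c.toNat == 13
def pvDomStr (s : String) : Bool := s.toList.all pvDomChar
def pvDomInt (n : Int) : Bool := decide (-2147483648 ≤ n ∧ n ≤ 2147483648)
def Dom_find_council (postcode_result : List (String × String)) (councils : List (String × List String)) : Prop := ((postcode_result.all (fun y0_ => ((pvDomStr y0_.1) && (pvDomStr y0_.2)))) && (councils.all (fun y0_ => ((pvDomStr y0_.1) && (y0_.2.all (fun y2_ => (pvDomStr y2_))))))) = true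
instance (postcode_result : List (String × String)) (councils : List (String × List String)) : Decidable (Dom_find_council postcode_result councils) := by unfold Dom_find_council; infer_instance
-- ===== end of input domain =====

-- B fuses A's two passes (exact scan, then flatten + stable sort by descending length + first
-- substring hit) into one single pass in dict order that returns on the first exact match and
-- otherwise tracks the longest substring match (strict '>'); objective: alternative (no sort).

-- ===== PORT A =====
-- candidates = [str(get("admin_district") or ""), str(get("parliamentary_constituency") or "")]; [c.lower() for c in candidates if c]
def pvCandidates (postcode_result : List (String × String)) : List String :=
  (([PySem.Dict.getD (PySem.Dict.mk postcode_result) "admin_district" "",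
     PySem.Dict.getD (PySem.Dict.mk postcode_result) "parliamentary_constituency" ""].filter
      (fun c => !(c == ""))).map PySem.Str.lower)

-- Pass 1 inner loop: 'for council in council_list: if any(c == council.lower() ...): return region, council'
def pvExactInner (cands : List String) (region : String) : List String → Option (String × String)
  | [] => none
  | c :: rest =>
    if cands.any (fun x => x == PySem.Str.lower c) then some (region, c)
    else pvExactInner cands region rest

-- Pass 1 outer loop over councils.items()
def pvExactPass (cands : List String) : List (String × List String) → Option (String × String)
  | [] => none
  | (region, cl) :: rest =>
    match pvExactInner cands region cl with
    | some r => some r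
    | none => pvExactPass cands rest

def find_council (postcode_result : List (String × String)) (councils : List (String × List String)) : Option (String × String) :=
  if (pvCandidates postcode_result).isEmpty then none
  else
    match pvExactPass (pvCandidates postcode_result) councils with
    | some r => some r
    | none =>
      -- all_councils list comprehension, then .sort(key=lambda rc: -len(rc[1])) (stable), then first substring hit
      (PySem.List.sorted
        (councils.flatMap (fun rcl => rcl.2.map (fun c => (rcl.1, c))))
        (fun rc => -(PySem.Str.len rc.2))).find?
        (fun rc => (pvCandidates postcode_result).any
          (fun c => PySem.Str.isIn (PySem.Str.lower rc.2) c))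

-- ===== PORT B =====
-- 'for key in (...): value = str(get(key) or ""); if value: candidates.append(value.lower())'
def pvAddKey (postcode_result : List (String × String)) (cands : List String) (key : String) : List String :=
  let v := PySem.Dict.getD (PySem.Dict.mk postcode_result) key ""
  if v == "" then cands else cands ++ [PySem.Str.lower v]

def pvCandsB (postcode_result : List (String × String)) : List String :=
  ["admin_district", "parliamentary_constituency"].foldl (pvAddKey postcode_result) []

-- 'if len(council) > best_len and any(low in c ...): best, best_len = (region, council), len(council)'
def pvBestStep (cands : List String) (st : Option (String × String) × Int) (rc : String × String) :
    Option (String × String) × Int :=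
  if st.2 < PySem.Str.len rc.2 then
    if cands.any (fun c => PySem.Str.isIn (PySem.Str.lower rc.2) c) then (some rc, PySem.Str.len rc.2)
    else st
  else st

-- fused inner loop: early return ('.inl') on an exact match, else threaded (best, best_len) state
def pvFusedInner (cands : List String) (region : String)
    (st : Option (String × String) × Int) :
    List String → Sum (String × String) (Option (String × String) × Int)
  | [] => .inr st
  | c :: rest =>
    if cands.contains (PySem.Str.lower c) then .inl (region, c)
    else pvFusedInner cands region (pvBestStep cands st (region, c)) rest

-- fused outer loop over councils.items(); at the end 'return best'
def pvFusedOuter (cands : List String) (st : Option (String × String) × Int) :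
    List (String × List String) → Option (String × String)
  | [] => st.1
  | (region, cl) :: rest =>
    match pvFusedInner cands region st cl with
    | .inl r => some r
    | .inr st' => pvFusedOuter cands st' rest

def find_council_alt (postcode_result : List (String × String)) (councils : List (String × List String)) : Option (String × String) :=
  let cands := pvCandsB postcode_result
  if cands.isEmpty then none
  else pvFusedOuter cands (none, -1) councils

-- ===== PRECONDITION & SPEC =====
def Spec_find_council (postcode_result : List (String × String)) (councils : List (String × List String)) (out : Option (String × String)) : Prop := out = find_council_alt postcode_result councils
instance (postcode_result : List (String × String)) (councils : List (String × List String)) (out : Option (String × String)) : Decidable (Spec_find_council postcode_result councils out) := by unfold Spec_find_council; infer_instance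

-- ===== CLAIM (what is proved, stated in full; the proofs are below) =====
def Claim_equal_find_council : Prop := ∀ (postcode_result : List (String × String)) (councils : List (String × List String)), Dom_find_council postcode_result councils → Spec_find_council postcode_result councils (find_council postcode_result councils)

-- ===== LEMMAS AND PROOFS =====

theorem pvCandsB_eq (pr : List (String × String)) : pvCandsB pr = pvCandidates pr := by
  unfold pvCandsB pvCandidates pvAddKey
  by_cases h1 : PySem.Dict.getD (PySem.Dict.mk pr) "admin_district" "" = "" <;>
    by_cases h2 : PySem.Dict.getD (PySem.Dict.mk pr) "parliamentary_constituency" "" = "" <;>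
      simp [h1, h2]

-- length tracked by the fused fold for a current best (-1 when there is none yet)
def pvLenOf : Option (String × String) → Int
  | none => -1
  | some rc => PySem.Str.len rc.2

-- fused inner loop = exact inner scan, else the pure substring fold
theorem pvFusedInner_eq (cands : List String) (region : String)
    (st : Option (String × String) × Int) (cl : List String) :
    pvFusedInner cands region st cl =
      match pvExactInner cands region cl with
      | some r => .inl r
      | none => .inr (cl.foldl (fun st c => pvBestStep cands st (region, c)) st) := by
  induction cl generalizing st with
  | nil => rfl
  | cons c rest ih =>
    simp only [pvFusedInner, pvExactInner, List.any_beq', List.foldl_cons]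
    by_cases h : cands.contains (PySem.Str.lower c) = true
    · have h' : PySem.Str.lower c ∈ cands := by simpa using h
      simp [h']
    · rw [if_neg h, if_neg h]
      exact ih _

-- fused outer loop = exact pass, else the nested substring fold
theorem pvFusedOuter_eq (cands : List String) (st : Option (String × String) × Int)
    (cs : List (String × List String)) :
    pvFusedOuter cands st cs =
      match pvExactPass cands cs with
      | some r => some r
      | none =>
        (cs.foldl (fun st rcl => rcl.2.foldl (fun st c => pvBestStep cands st (rcl.1, c)) st) st).1 := by
  induction cs generalizing st with
  | nil => rfl
  | cons rcl rest ih =>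
    obtain ⟨region, cl⟩ := rcl
    simp only [pvFusedOuter, pvExactPass, pvFusedInner_eq, List.foldl_cons]
    cases h : pvExactInner cands region cl with
    | some r => rfl
    | none => simpa using ih _

theorem pvInsertBy_cons (bf : (String × String) → (String × String) → Bool)
    (x y : String × String) (ys : List (String × String)) :
    PySem.List.insertBy bf x (y :: ys) =
      if bf x y then x :: y :: ys else y :: PySem.List.insertBy bf x ys := rfl

theorem pvFind_insertBy (p : String × String → Bool) (x : String × String)
    (ys : List (String × String))
    (hys : ys.Pairwise (fun a b => -(PySem.Str.len a.2) ≤ -(PySem.Str.len b.2))) :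
    (PySem.List.insertBy
        (fun a b => decide (-(PySem.Str.len a.2) < -(PySem.Str.len b.2))) x ys).find? p
      = if pvLenOf (ys.find? p) < PySem.Str.len x.2 then
          (if p x then some x else ys.find? p)
        else ys.find? p := by
  induction ys with
  | nil =>
    cases hpx : p x <;>
      simp [PySem.List.insertBy, pvLenOf, hpx, List.find?, PySem.Str.len_eq] <;> omega
  | cons y t ih =>
    rcases List.pairwise_cons.mp hys with ⟨hy, ht⟩
    rw [pvInsertBy_cons]
    by_cases h : -(PySem.Str.len x.2) < -(PySem.Str.len y.2)
    · have hall : pvLenOf ((y :: t).find? p) < PySem.Str.len x.2 := by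
        cases hf : (y :: t).find? p with
        | none =>
          simp only [pvLenOf, PySem.Str.len_eq]; omega
        | some m =>
          have hm := List.mem_of_find?_eq_some hf
          rcases List.mem_cons.mp hm with rfl | hmt
          · simp only [pvLenOf]; omega
          · have hym := hy m hmt
            simp only [pvLenOf]; omega
      rw [if_pos (by simpa using h), if_pos hall]
      cases hpx : p x <;> simp [List.find?, hpx]
    · rw [if_neg (by simpa using h)]
      have hyx : PySem.Str.len x.2 ≤ PySem.Str.len y.2 := by omega
      cases hpy : p y
      · have hfy : (y :: t).find? p = t.find? p := by simp [List.find?, hpy]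
        have hfi : (y :: PySem.List.insertBy
            (fun a b => decide (-(PySem.Str.len a.2) < -(PySem.Str.len b.2))) x t).find? p
            = (PySem.List.insertBy
            (fun a b => decide (-(PySem.Str.len a.2) < -(PySem.Str.len b.2))) x t).find? p := by
          simp [List.find?, hpy]
        rw [hfi, hfy, ih ht]
      · have hfy : (y :: t).find? p = some y := by simp [List.find?, hpy]
        have hfi : (y :: PySem.List.insertBy
            (fun a b => decide (-(PySem.Str.len a.2) < -(PySem.Str.len b.2))) x t).find? p
            = some y := by simp [List.find?, hpy]
        rw [hfi, hfy]
        have hnot : ¬ pvLenOf (some y) < PySem.Str.len x.2 := by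
          simp only [pvLenOf]; omega
        rw [if_neg hnot]

theorem pvFold_eq (cands : List String) (cs : List (String × String)) :
    cs.foldl (pvBestStep cands) (none, -1)
      = (((PySem.List.sorted cs (fun rc => -(PySem.Str.len rc.2))).find?
            (fun rc => cands.any (fun c => PySem.Str.isIn (PySem.Str.lower rc.2) c))),
          pvLenOf ((PySem.List.sorted cs (fun rc => -(PySem.Str.len rc.2))).find?
            (fun rc => cands.any (fun c => PySem.Str.isIn (PySem.Str.lower rc.2) c)))) := by
  induction cs using List.reverseRecOn with
  | nil => rfl
  | append_singleton cs x ih =>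
    have hsorted : PySem.List.sorted (cs ++ [x]) (fun rc => -(PySem.Str.len rc.2))
        = PySem.List.insertBy
            (fun a b => decide (-(PySem.Str.len a.2) < -(PySem.Str.len b.2))) x
            (PySem.List.sorted cs (fun rc => -(PySem.Str.len rc.2))) := by
      rw [PySem.List.sorted_eq_foldl_insertBy, PySem.List.sorted_eq_foldl_insertBy,
        List.foldl_append, List.foldl_cons, List.foldl_nil]
    rw [List.foldl_append, List.foldl_cons, List.foldl_nil, ih, hsorted,
      pvFind_insertBy _ _ _ (PySem.List.sorted_pairwise _ _)]
    by_cases hlen : pvLenOf ((PySem.List.sorted cs (fun rc => -(PySem.Str.len rc.2))).find?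
        (fun rc => cands.any (fun c => PySem.Str.isIn (PySem.Str.lower rc.2) c))) < PySem.Str.len x.2
    · simp only [pvBestStep]
      rw [if_pos hlen, if_pos hlen]
      cases hpx : cands.any (fun c => PySem.Str.isIn (PySem.Str.lower x.2) c) <;>
        simp [pvLenOf]
    · simp only [pvBestStep]
      rw [if_neg hlen, if_neg hlen]

theorem pvNested_fold (cands : List String) (cs : List (String × List String))
    (init : Option (String × String) × Int) :
    cs.foldl (fun st rcl => rcl.2.foldl (fun st c => pvBestStep cands st (rcl.1, c)) st) init
      = (cs.flatMap (fun rcl => rcl.2.map (fun c => (rcl.1, c)))).foldl (pvBestStep cands) init := by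
  induction cs generalizing init with
  | nil => rfl
  | cons rcl rest ih =>
    simp only [List.flatMap_cons, List.foldl_append, List.foldl_cons, List.foldl_map, ih]

-- ===== VERDICT (by name: the statement is the Claim_ definition above) =====
theorem find_council_spec : Claim_equal_find_council := by
  intro postcode_result councils _
  unfold Spec_find_council find_council find_council_alt
  rw [pvCandsB_eq]
  by_cases hemp : (pvCandidates postcode_result).isEmpty
  · simp [hemp]
  · simp only [hemp, if_false, Bool.false_eq_true]
    rw [pvFusedOuter_eq]
    cases hp : pvExactPass (pvCandidates postcode_result) councils with
    | some r => rfl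
    | none =>
      simp only []
      rw [pvNested_fold, pvFold_eq]
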